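-- pv_equiv track=rewrite | github.com/fredrik-rose/AudioDetective | audiodetective/audiofingerprint/visualize.py | _extract_target_zone_matches
-- ===== SOURCE A (Python) =====
-- import collections as collect
--
-- def _extract_target_zone_matches(these, those, delta_time, granularity):
--     """
--     Extracts target zone matches from fingerprints.
--     :param these: Fingerprints to match.
--     :param those: Fingerprints to match with.
--     :param delta_time: Time difference of a match.
--     :param granularity: Time granularity of a match.
--     :return: Target zone matches.
--     """
--     matches = collect.defaultdict(set)
--     for descriptor, times in these.items():
--         if descriptor in those:
--             for this in times:
--                 for that in those[descriptor]:
--                     if delta_time - granularity <= this - that <= delta_time + granularity: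
--                         matches[descriptor].add(this)
--     return dict(matches)
-- ===== SOURCE B (Python) =====
-- def _bisect_left(a, x):
--     lo, hi = 0, len(a)
--     while lo < hi:
--         mid = (lo + hi) // 2
--         if a[mid] < x:
--             lo = mid + 1
--         else:
--             hi = mid
--     return lo
--
--
-- def _extract_target_zone_matches(these, those, delta_time, granularity):
--     """
--     Extracts target zone matches from fingerprints.
--
--     Per descriptor, sorts the candidate times once and uses a binary search
--     for the range-existence test instead of a linear scan per time.
--     """
--     matches = {}
--     for descriptor, times in these.items():
--         thats = those.get(descriptor)
--         if thats is None:
--             continue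
--         ordered = sorted(thats)
--         hits = set()
--         for this in times:
--             i = _bisect_left(ordered, this - delta_time - granularity)
--             if i < len(ordered) and ordered[i] <= this - delta_time + granularity:
--                 hits.add(this)
--         if hits:
--             matches[descriptor] = hits
--     return matches
-- ===== Notes on version B (the rewrite author's own statement) =====
-- stated objective: faster
-- what changed: Per descriptor, B sorts the candidate time list once and decides the window test with a binary search (bisect_left) per time, replacing A's linear scan over all candidate times for every time; B also builds a plain dict instead of a defaultdict of sets.
import Mathlib
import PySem

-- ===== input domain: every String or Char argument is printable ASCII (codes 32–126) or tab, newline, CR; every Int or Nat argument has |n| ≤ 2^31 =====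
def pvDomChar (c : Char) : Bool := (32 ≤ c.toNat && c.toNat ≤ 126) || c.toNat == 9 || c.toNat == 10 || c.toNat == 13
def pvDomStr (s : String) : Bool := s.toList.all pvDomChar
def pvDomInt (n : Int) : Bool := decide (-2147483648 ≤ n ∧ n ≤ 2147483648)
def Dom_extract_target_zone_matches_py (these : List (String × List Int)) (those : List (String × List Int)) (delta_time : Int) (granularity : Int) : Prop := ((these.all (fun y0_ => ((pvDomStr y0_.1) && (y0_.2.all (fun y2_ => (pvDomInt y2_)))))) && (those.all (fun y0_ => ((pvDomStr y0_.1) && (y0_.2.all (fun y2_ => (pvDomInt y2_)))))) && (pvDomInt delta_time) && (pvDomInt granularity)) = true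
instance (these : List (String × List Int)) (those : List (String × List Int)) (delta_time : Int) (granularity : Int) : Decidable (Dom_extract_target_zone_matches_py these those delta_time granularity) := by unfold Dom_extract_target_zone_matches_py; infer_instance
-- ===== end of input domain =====

-- B sorts each candidate time list once and binary-searches for the range-existence test
-- instead of A's linear scan of all candidate times per time (objective: faster).

-- ===== PORT A =====
def extract_target_zone_matches_py (these : List (String × List Int)) (those : List (String × List Int)) (delta_time : Int) (granularity : Int) : List (String × List Int) :=
  let thoseD : PySem.Dict String (List Int) := PySem.Dict.mk those
  let acc_matches : PySem.Dict String (PySem.Set Int) :=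
    these.foldl (fun m p =>
      if thoseD.contains p.1 then
        p.2.foldl (fun m this =>
          (thoseD.getD p.1 []).foldl (fun m that =>
            if delta_time - granularity ≤ this - that ∧ this - that ≤ delta_time + granularity then
              m.modify p.1 PySem.Set.empty (fun s => PySem.Set.add s this)
            else m) m) m
      else m) PySem.Dict.empty
  acc_matches.items

-- ===== PORT B =====
-- Source B's hand-written `_bisect_left` is exactly the lo/hi midpoint halving loop that
-- PySem.List.bisectLeft implements (same loop), so it is ported as that primitive.
def extract_target_zone_matches_py_alt (these : List (String × List Int)) (those : List (String × List Int)) (delta_time : Int) (granularity : Int) : List (String × List Int) :=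
  let thoseD : PySem.Dict String (List Int) := PySem.Dict.mk those
  these.foldl (fun acc p =>
    match thoseD.get? p.1 with
    | none => acc
    | some thats =>
      let ordered := PySem.List.sorted thats (fun x => x)
      let hits : PySem.Set Int :=
        p.2.foldl (fun s this =>
          let i := PySem.List.bisectLeft ordered (this - delta_time - granularity)
          if i < ordered.length ∧ ordered.getD i 0 ≤ this - delta_time + granularity then
            PySem.Set.add s this
          else s) PySem.Set.empty
      if hits.isEmpty then acc else acc ++ [(p.1, hits)]) []

-- ===== PRECONDITION & SPEC =====
-- Pre_ excludes `these` association lists with a duplicate descriptor: such a list does not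
-- represent a Python dict (dict keys are unique), and on it the two ports' grouping of the
-- duplicate entries is an artefact of the representation.
def Pre_extract_target_zone_matches_py (these : List (String × List Int)) (those : List (String × List Int)) (delta_time : Int) (granularity : Int) : Prop :=
  (these.map Prod.fst).Nodup
instance (these : List (String × List Int)) (those : List (String × List Int)) (delta_time : Int) (granularity : Int) : Decidable (Pre_extract_target_zone_matches_py these those delta_time granularity) := by unfold Pre_extract_target_zone_matches_py; infer_instance

def pvWitness_extract_target_zone_matches_py : (List (String × List Int)) × (List (String × List Int)) × Int × Int :=
  ([("a", [5]), ("b", [1])], [("a", [3])], 2, 0)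

def Spec_extract_target_zone_matches_py (these : List (String × List Int)) (those : List (String × List Int)) (delta_time : Int) (granularity : Int) (out : List (String × List Int)) : Prop := out = extract_target_zone_matches_py_alt these those delta_time granularity
instance (these : List (String × List Int)) (those : List (String × List Int)) (delta_time : Int) (granularity : Int) (out : List (String × List Int)) : Decidable (Spec_extract_target_zone_matches_py these those delta_time granularity out) := by unfold Spec_extract_target_zone_matches_py; infer_instance

-- ===== CLAIM (what is proved, stated in full; the proofs are below) =====
def Claim_equal_extract_target_zone_matches_py : Prop := ∀ (these : List (String × List Int)) (those : List (String × List Int)) (delta_time : Int) (granularity : Int), Dom_extract_target_zone_matches_py these those delta_time granularity → Pre_extract_target_zone_matches_py these those delta_time granularity → Spec_extract_target_zone_matches_py these those delta_time granularity (extract_target_zone_matches_py these those delta_time granularity)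

-- ===== LEMMAS AND PROOFS =====

-- A fold of `if c x then F b else b` over a list, for idempotent F, fires F at most once.
theorem pvFoldlIteIdem {α β : Type} (c : α → Prop) [DecidablePred c] (F : β → β)
    (hF : ∀ b, F (F b) = F b) :
    ∀ (l : List α) (b : β),
      l.foldl (fun b x => if c x then F b else b) b = if ∃ x ∈ l, c x then F b else b := by
  intro l
  induction l with
  | nil => intro b; simp
  | cons y t ih =>
    intro b
    by_cases h : c y
    · simp only [List.foldl_cons, if_pos h, ih]
      have hex : ∃ x ∈ y :: t, c x := ⟨y, List.mem_cons_self, h⟩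
      rw [if_pos hex]
      split_ifs <;> simp [hF]
    · simp only [List.foldl_cons, if_neg h, ih]
      have hiff : (∃ x ∈ y :: t, c x) ↔ (∃ x ∈ t, c x) := by
        constructor
        · rintro ⟨x, hx, hcx⟩
          rcases List.mem_cons.mp hx with rfl | hx'
          · exact absurd hcx h
          · exact ⟨x, hx', hcx⟩
        · rintro ⟨x, hx, hcx⟩; exact ⟨x, List.mem_cons_of_mem _ hx, hcx⟩
      rw [if_congr hiff rfl rfl]

-- `matches[d].add t` is idempotent.
theorem pvModifyAddIdem (m : PySem.Dict String (PySem.Set Int)) (d : String) (t : Int) :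
    (m.modify d PySem.Set.empty (fun s => PySem.Set.add s t)).modify d PySem.Set.empty (fun s => PySem.Set.add s t)
      = m.modify d PySem.Set.empty (fun s => PySem.Set.add s t) := by
  unfold PySem.Dict.modify
  beta_reduce
  rw [PySem.Dict.getD_insert_self]
  rw [PySem.Set.add_of_mem ((PySem.Set.mem_add _ t t).mpr (Or.inr rfl))]
  rw [PySem.Dict.insert_insert_self]

-- defaultdict access on a fresh key appends the new entry.
theorem pvItemsModifyFresh (m : PySem.Dict String (PySem.Set Int)) (d : String)
    (f : PySem.Set Int → PySem.Set Int) (h : m.contains d = false) :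
    (m.modify d PySem.Set.empty f).items = m.items ++ [(d, f PySem.Set.empty)] := by
  unfold PySem.Dict.modify
  rw [PySem.Dict.getD_of_not_contains m PySem.Set.empty h]
  exact PySem.Dict.items_insert_of_not_contains m _ h

-- defaultdict access on the key of the last entry (the key fresh in the prefix) updates it in place.
theorem pvModifyAppendLast (m : PySem.Dict String (PySem.Set Int)) (d : String) (v : PySem.Set Int)
    (f : PySem.Set Int → PySem.Set Int) (h : m.contains d = false) :
    (PySem.Dict.mk (m.items ++ [(d, v)])).modify d PySem.Set.empty f
      = PySem.Dict.mk (m.items ++ [(d, f v)]) := by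
  have hall : ∀ p ∈ m.items, (p.1 == d) = false := by
    intro p hp
    have hc := h
    unfold PySem.Dict.contains at hc
    simp only [List.any_eq_false] at hc
    simpa using hc p hp
  have hget : (PySem.Dict.mk (m.items ++ [(d, v)])).get? d = some v := by
    unfold PySem.Dict.get?
    rw [List.find?_append]
    have h1 : List.find? (fun p => p.1 == d) m.items = none := by
      rw [List.find?_eq_none]
      intro p hp; simp [hall p hp]
    simp [h1]
  have hcont : (PySem.Dict.mk (m.items ++ [(d, v)])).contains d = true := by
    rw [PySem.Dict.contains_eq_isSome_get?, hget]; rfl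
  unfold PySem.Dict.modify
  rw [PySem.Dict.getD_eq_get?_getD, hget]
  simp only [Option.getD_some]
  unfold PySem.Dict.insert
  rw [if_pos hcont]
  apply PySem.Dict.ext
  simp only [List.map_append]
  congr 1
  · calc List.map (fun p => if (p.1 == d) = true then (d, f v) else p) m.items
        = List.map id m.items := List.map_congr_left (fun p hp => by simp [hall p hp])
      _ = m.items := List.map_id _
  · simp

-- A's two inner loops over one entry (d, ts), started from a state that is `m` plus an
-- optional last entry (d, s), fold the per-time membership condition into the set s.
theorem pvEntryA (dt g : Int) (thats : List Int) (d : String) :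
    ∀ (ts : List Int) (m : PySem.Dict String (PySem.Set Int)) (s : PySem.Set Int),
      m.contains d = false →
      ts.foldl (fun m this =>
          thats.foldl (fun m that =>
            if dt - g ≤ this - that ∧ this - that ≤ dt + g then
              m.modify d PySem.Set.empty (fun s => PySem.Set.add s this)
            else m) m)
        (if s = [] then m else PySem.Dict.mk (m.items ++ [(d, s)]))
      = (if ts.foldl (fun s this =>
            if ∃ that ∈ thats, dt - g ≤ this - that ∧ this - that ≤ dt + g then
              PySem.Set.add s this else s) s = [] then m
         else PySem.Dict.mk (m.items ++ [(d, ts.foldl (fun s this =>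
            if ∃ that ∈ thats, dt - g ≤ this - that ∧ this - that ≤ dt + g then
              PySem.Set.add s this else s) s)])) := by
  intro ts
  induction ts with
  | nil => intro m s _; rfl
  | cons t ts ih =>
    intro m s hm
    simp only [List.foldl_cons]
    rw [pvFoldlIteIdem (fun that => dt - g ≤ t - that ∧ t - that ≤ dt + g)
        (fun m => m.modify d PySem.Set.empty (fun s => PySem.Set.add s t))
        (fun m => pvModifyAddIdem m d t)]
    by_cases hc : ∃ that ∈ thats, dt - g ≤ t - that ∧ t - that ≤ dt + g
    · rw [if_pos hc, if_pos hc]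
      have hstate :
          (if s = [] then m else PySem.Dict.mk (m.items ++ [(d, s)])).modify d
              PySem.Set.empty (fun s => PySem.Set.add s t)
            = (if PySem.Set.add s t = [] then m
               else PySem.Dict.mk (m.items ++ [(d, PySem.Set.add s t)])) := by
        by_cases hs : s = []
        · subst hs
          rw [if_pos rfl]
          have hne : PySem.Set.add ([] : PySem.Set Int) t ≠ [] := by
            simp
          rw [if_neg hne]
          apply PySem.Dict.ext
          rw [pvItemsModifyFresh m d _ hm]
          rfl
        · have hne : PySem.Set.add s t ≠ [] := by
            rw [PySem.Set.add_eq_ite]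
            split_ifs with h
            · exact hs
            · simp
          rw [if_neg hs, if_neg hne]
          exact pvModifyAppendLast m d s _ hm
      rw [hstate]
      exact ih m (PySem.Set.add s t) hm
    · rw [if_neg hc, if_neg hc]
      exact ih m s hm

-- A's membership test (some candidate within the window) is B's binary-search test.
theorem pvBisectCond (thats : List Int) (lo hi : Int) :
    (∃ x ∈ thats, lo ≤ x ∧ x ≤ hi) ↔
      (PySem.List.bisectLeft (PySem.List.sorted thats (fun x => x)) lo
          < (PySem.List.sorted thats (fun x => x)).length
        ∧ (PySem.List.sorted thats (fun x => x)).getD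
            (PySem.List.bisectLeft (PySem.List.sorted thats (fun x => x)) lo) 0 ≤ hi) := by
  set s := PySem.List.sorted thats (fun x => x) with hs
  have hpair : List.Pairwise (fun a b => a ≤ b) s := PySem.List.sorted_pairwise thats (fun x => x)
  obtain ⟨hle, hlt, hge⟩ := PySem.List.bisectLeft_spec s lo hpair
  set i := PySem.List.bisectLeft s lo with hi'
  constructor
  · rintro ⟨x, hx, hxlo, hxhi⟩
    have hxs : x ∈ s := (PySem.List.mem_sorted thats (fun x => x) false x).mpr hx
    obtain ⟨j, hj, hxj⟩ := List.mem_iff_getElem.mp hxs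
    have hij : i ≤ j := by
      by_contra hlt'
      have := hlt j hj (by omega)
      omega
    have hilen : i < s.length := lt_of_le_of_lt hij hj
    refine ⟨hilen, ?_⟩
    rw [List.getD_eq_getElem s 0 hilen]
    have hsij : s[i]'hilen ≤ s[j]'hj := PySem.List.sorted_id_getElem_mono thats hij hj
    omega
  · rintro ⟨hilen, hhi⟩
    refine ⟨s[i], (PySem.List.mem_sorted thats (fun x => x) false _).mp (List.getElem_mem hilen), ?_, ?_⟩
    · exact hge i hilen le_rfl
    · rw [List.getD_eq_getElem s 0 hilen] at hhi
      exact hhi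

-- per-entry: the set A accumulates equals B's hits set.
theorem pvHitsEq (dt g : Int) (thats : List Int) (ts : List Int) :
    ts.foldl (fun s this =>
        if ∃ that ∈ thats, dt - g ≤ this - that ∧ this - that ≤ dt + g then
          PySem.Set.add s this else s) PySem.Set.empty
    = ts.foldl (fun s this =>
        if PySem.List.bisectLeft (PySem.List.sorted thats (fun x => x)) (this - dt - g)
              < (PySem.List.sorted thats (fun x => x)).length
            ∧ (PySem.List.sorted thats (fun x => x)).getD
                (PySem.List.bisectLeft (PySem.List.sorted thats (fun x => x)) (this - dt - g)) 0
              ≤ this - dt + g then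
          PySem.Set.add s this else s) PySem.Set.empty := by
  apply PySem.List.foldl_congr_mem
  intro s x _
  have h1 : (∃ that ∈ thats, dt - g ≤ x - that ∧ x - that ≤ dt + g)
      ↔ (∃ y ∈ thats, x - dt - g ≤ y ∧ y ≤ x - dt + g) := by
    constructor
    · rintro ⟨y, hy, h⟩; exact ⟨y, hy, by omega⟩
    · rintro ⟨y, hy, h⟩; exact ⟨y, hy, by omega⟩
  rw [if_congr (h1.trans (pvBisectCond thats (x - dt - g) (x - dt + g))) rfl rfl]

-- the outer loop: A's dict fold and B's list fold stay in lock step.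
theorem pvOuter (dt g : Int) (thoseD : PySem.Dict String (List Int)) :
    ∀ (l : List (String × List Int)) (m : PySem.Dict String (PySem.Set Int))
      (acc : List (String × List Int)),
      (l.map Prod.fst).Nodup →
      (∀ q ∈ l, m.contains q.1 = false) →
      m.items = acc →
      (l.foldl (fun m p =>
          if thoseD.contains p.1 then
            p.2.foldl (fun m this =>
              (thoseD.getD p.1 []).foldl (fun m that =>
                if dt - g ≤ this - that ∧ this - that ≤ dt + g then
                  m.modify p.1 PySem.Set.empty (fun s => PySem.Set.add s this)
                else m) m) m
          else m) m).items
      = l.foldl (fun acc p =>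
          match thoseD.get? p.1 with
          | none => acc
          | some thats =>
            let ordered := PySem.List.sorted thats (fun x => x)
            let hits : PySem.Set Int :=
              p.2.foldl (fun s this =>
                let i := PySem.List.bisectLeft ordered (this - dt - g)
                if i < ordered.length ∧ ordered.getD i 0 ≤ this - dt + g then
                  PySem.Set.add s this
                else s) PySem.Set.empty
            if hits.isEmpty then acc else acc ++ [(p.1, hits)]) acc := by
  intro l
  induction l with
  | nil => intro m acc _ _ hitems; simpa using hitems
  | cons p l ih =>
    intro m acc hnd hfresh hitems
    simp only [List.foldl_cons]
    have hndl : (l.map Prod.fst).Nodup := (List.nodup_cons.mp (by simpa using hnd)).2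
    have hpnotin : p.1 ∉ l.map Prod.fst := (List.nodup_cons.mp (by simpa using hnd)).1
    by_cases hc : thoseD.contains p.1 = true
    · obtain ⟨v, hv⟩ : ∃ v, thoseD.get? p.1 = some v := by
        rw [PySem.Dict.contains_eq_isSome_get?] at hc
        exact Option.isSome_iff_exists.mp hc
      have hgetD : thoseD.getD p.1 [] = v := by
        rw [PySem.Dict.getD_eq_get?_getD, hv]; rfl
      rw [if_pos hc]
      simp only [hv]
      have hfm : m.contains p.1 = false := hfresh p List.mem_cons_self
      have hA := pvEntryA dt g v p.1 p.2 m PySem.Set.empty hfm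
      rw [show (if (PySem.Set.empty : PySem.Set Int) = [] then m
            else PySem.Dict.mk (m.items ++ [(p.1, (PySem.Set.empty : PySem.Set Int))])) = m
          from if_pos rfl] at hA
      rw [hgetD, hA]
      set hitsA := p.2.foldl (fun s this =>
          if ∃ that ∈ v, dt - g ≤ this - that ∧ this - that ≤ dt + g then
            PySem.Set.add s this else s) PySem.Set.empty with hhitsA
      have hhits : hitsA = p.2.foldl (fun s this =>
          let i := PySem.List.bisectLeft (PySem.List.sorted v (fun x => x)) (this - dt - g)
          if i < (PySem.List.sorted v (fun x => x)).length
              ∧ (PySem.List.sorted v (fun x => x)).getD i 0 ≤ this - dt + g then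
            PySem.Set.add s this
          else s) PySem.Set.empty := pvHitsEq dt g v p.2
      rw [← hhits]
      by_cases hemp : hitsA = []
      · rw [if_pos hemp, hemp]
        simp only [List.isEmpty_nil, if_true]
        exact ih m acc hndl (fun q hq => hfresh q (List.mem_cons_of_mem _ hq)) hitems
      · rw [if_neg hemp]
        have : hitsA.isEmpty = false := by
          rw [List.isEmpty_eq_false_iff]
          exact hemp
        rw [this]
        simp only [Bool.false_eq_true, if_false]
        apply ih (PySem.Dict.mk (m.items ++ [(p.1, hitsA)])) (acc ++ [(p.1, hitsA)]) hndl
        · intro q hq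
          have hne : p.1 ≠ q.1 := fun he => hpnotin (he ▸ List.mem_map_of_mem hq)
          have h1 := hfresh q (List.mem_cons_of_mem _ hq)
          unfold PySem.Dict.contains at h1 ⊢
          simp [List.any_append, h1, hne]
        · simp [hitems]
    · have hnone : thoseD.get? p.1 = none := by
        rw [PySem.Dict.contains_eq_isSome_get?] at hc
        simpa using hc
      rw [if_neg hc, hnone]
      exact ih m acc hndl (fun q hq => hfresh q (List.mem_cons_of_mem _ hq)) hitems

-- ===== VERDICT (by name: the statement is the Claim_ definition above) =====
theorem extract_target_zone_matches_py_spec : Claim_equal_extract_target_zone_matches_py := by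
  intro these those dt g _ hpre
  unfold Spec_extract_target_zone_matches_py
  unfold extract_target_zone_matches_py extract_target_zone_matches_py_alt
  exact pvOuter dt g (PySem.Dict.mk those) these PySem.Dict.empty [] hpre
    (fun q _ => by simp [PySem.Dict.contains, PySem.Dict.empty]) rfl
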